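-- pv_equiv track=rewrite | github.com/KKeshav1101/NPTEL_Getting_Started_with_CP | Week_1/practice_assignment2.py | will_fly_visit_all_cups
-- ===== SOURCE A (Python) =====
-- def will_fly_visit_all_cups(n):
--     # The fly will visit all cups if and only if the step size and n are coprime.
--     # This is true if and only if GCD(n, k) is 1 for all k.
--     # However, we just need to check if GCD(n, k) == 1 for any k in the sequence.
--     visited = [False] * n
--     position = 0
--     for k in range(1, n + 1):
--         position = (position + k) % n
--         if visited[position]:
--             return "NO"
--         visited[position] = True
--     return "YES"
-- ===== SOURCE B (Python) =====
-- def will_fly_visit_all_cups(n):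
--     # The fly visits every cup exactly when the number of cups is a power of two
--     # (n & (n - 1) == 0; with no cups at all, none is missed either).
--     return "YES" if n & (n - 1) == 0 else "NO"
-- ===== Notes on version B (the rewrite author's own statement) =====
-- stated objective: faster
-- what changed: Replaces the O(n) simulation of the fly's triangular-step walk (boolean visited array) with the O(1) closed-form answer: all cups are visited iff n is a power of two, tested with the n & (n - 1) == 0 bit trick.
-- intended difference: For n >= 2 a power of two (2, 4, 8, ...) A returns "NO" because its last step adds n = 0 (mod n) and revisits the previous cup, while B returns the intended "YES": the fly does visit all cups exactly when n is a power of two (A's own comment says coprimality/coverage is what is being tested). — e.g. on will_fly_visit_all_cups(2): A returns "NO", B returns "YES"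
-- outside the precondition, e.g. on will_fly_visit_all_cups(-3): A returns 'YES', B returns 'NO'
import Mathlib
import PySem

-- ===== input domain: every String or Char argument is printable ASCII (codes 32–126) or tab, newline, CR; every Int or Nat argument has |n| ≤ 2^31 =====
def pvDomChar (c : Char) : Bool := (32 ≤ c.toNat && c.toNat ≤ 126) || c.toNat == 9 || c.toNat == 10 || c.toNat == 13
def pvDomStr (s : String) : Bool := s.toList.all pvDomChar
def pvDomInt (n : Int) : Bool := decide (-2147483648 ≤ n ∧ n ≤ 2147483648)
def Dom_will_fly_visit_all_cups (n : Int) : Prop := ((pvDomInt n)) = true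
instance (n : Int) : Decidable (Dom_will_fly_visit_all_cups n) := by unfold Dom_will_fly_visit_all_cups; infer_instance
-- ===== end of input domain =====

-- B replaces A's O(n) visited-array walk with the O(1) power-of-two closed form; on powers of two >= 2
-- A's buggy final step (adding n = 0 mod n) answers "NO" while B gives the intended "YES" (see D_ below).


-- ===== PORT A =====
-- the for-loop of A: state = (visited, position), early 'return "NO"' on a revisit.
-- Python's visited[position] would raise IndexError out of range, but whenever the loop body runs
-- n ≥ 1 and position = x % n ∈ [0, n), inside the array; pyGetD / List.set at position.toNat are exact there.
def pvAGo (n : Int) : List Int → List Bool → Int → String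
  | [], _, _ => "YES"
  | k :: ks, visited, position =>
    let position' := PySem.Int.mod (position + k) n
    if PySem.List.pyGetD visited position' false then "NO"
    else pvAGo n ks (visited.set position'.toNat true) position'

def will_fly_visit_all_cups (n : Int) : String :=
  pvAGo n (PySem.List.pyRange 1 (n + 1) 1) (List.replicate n.toNat false) 0

-- ===== PORT B =====
-- Source B: return "YES" if n & (n - 1) == 0 else "NO"
def will_fly_visit_all_cups_alt (n : Int) : String :=
  if PySem.Int.band n (n - 1) = 0 then "YES" else "NO"

-- ===== PRECONDITION & SPEC =====
-- Pre_ restricts to the task's natural domain, a non-negative number of cups: for n < 0 A's loop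
-- body never runs and A returns "YES" accidentally (B naturally answers "NO" there).
def Pre_will_fly_visit_all_cups (n : Int) : Prop := 0 ≤ n
instance (n : Int) : Decidable (Pre_will_fly_visit_all_cups n) := by unfold Pre_will_fly_visit_all_cups; infer_instance
def pvWitness_will_fly_visit_all_cups : Int := 1

-- For n ≥ 2 a power of two A returns "NO" (its last step adds n ≡ 0 mod n and revisits the previous
-- cup) while B returns the intended "YES": the fly visits all cups exactly when n is a power of two.
def D_will_fly_visit_all_cups (n : Int) : Prop := 2 ≤ n ∧ ∃ k ∈ Finset.range 32, n = 2 ^ k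
instance (n : Int) : Decidable (D_will_fly_visit_all_cups n) := by unfold D_will_fly_visit_all_cups; infer_instance

def Spec_will_fly_visit_all_cups (n : Int) (out : String) : Prop := ¬ D_will_fly_visit_all_cups n → out = will_fly_visit_all_cups_alt n
instance (n : Int) (out : String) : Decidable (Spec_will_fly_visit_all_cups n out) := by unfold Spec_will_fly_visit_all_cups; infer_instance

def pvDiffWitness_will_fly_visit_all_cups : Int := 2
def pvDiffWitnessOut_will_fly_visit_all_cups : String × String := ("NO", "YES")

-- ===== CLAIM (what is proved, stated in full; the proofs are below) =====
def Claim_unchanged_will_fly_visit_all_cups : Prop := ∀ (n : Int), Dom_will_fly_visit_all_cups n → Pre_will_fly_visit_all_cups n → Spec_will_fly_visit_all_cups n (will_fly_visit_all_cups n)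
def Claim_changed_will_fly_visit_all_cups : Prop := Dom_will_fly_visit_all_cups (pvDiffWitness_will_fly_visit_all_cups) ∧ Pre_will_fly_visit_all_cups (pvDiffWitness_will_fly_visit_all_cups) ∧ D_will_fly_visit_all_cups (pvDiffWitness_will_fly_visit_all_cups) ∧ will_fly_visit_all_cups (pvDiffWitness_will_fly_visit_all_cups) = pvDiffWitnessOut_will_fly_visit_all_cups.1 ∧ will_fly_visit_all_cups_alt (pvDiffWitness_will_fly_visit_all_cups) = pvDiffWitnessOut_will_fly_visit_all_cups.2 ∧ pvDiffWitnessOut_will_fly_visit_all_cups.1 ≠ pvDiffWitnessOut_will_fly_visit_all_cups.2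
def Claim_exact_will_fly_visit_all_cups : Prop := ∀ (n : Int), Dom_will_fly_visit_all_cups n → Pre_will_fly_visit_all_cups n → D_will_fly_visit_all_cups n → will_fly_visit_all_cups n ≠ will_fly_visit_all_cups_alt n

-- ===== LEMMAS AND PROOFS =====

-- once some position p (0 ≤ p < n) is marked and carried, a trailing step of size n revisits it
theorem pvAGo_last_no (n : Int) (ks : List Int) (visited : List Bool) (p : Int)
    (h0 : 0 ≤ p) (h1 : p < n) (hl : visited.length = n.toNat) :
    pvAGo n (ks ++ [n]) (visited.set p.toNat true) p = "NO" := by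
  have hn : (0:Int) < n := lt_of_le_of_lt h0 h1
  induction ks generalizing visited p with
  | nil =>
    have hmod : PySem.Int.mod (p + n) n = p := by
      rw [PySem.Int.mod_eq_emod_of_pos hn,
          show p + n = p + n * 1 by ring, Int.add_mul_emod_self_left]
      exact Int.emod_eq_of_lt h0 h1
    have hlen : p < ((visited.set p.toNat true).length : Int) := by
      rw [List.length_set, hl]; omega
    simp only [List.nil_append, pvAGo, hmod]
    rw [PySem.List.pyGetD_eq_getElem _ _ h0 hlen]
    simp
  | cons k ks ih =>
    simp only [List.cons_append, pvAGo]
    split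
    · rfl
    · exact ih (visited.set p.toNat true) (PySem.Int.mod (p + k) n)
        (PySem.Int.mod_nonneg _ hn) (PySem.Int.mod_lt _ hn)
        (by rw [List.length_set, hl])

-- A answers "NO" on every n ≥ 2
theorem pvA_no_of_two_le (n : Int) (h : 2 ≤ n) : will_fly_visit_all_cups n = "NO" := by
  unfold will_fly_visit_all_cups
  rw [PySem.List.pyRange_one_cons (by omega : (1:Int) < n + 1),
      show (1:Int) + 1 = 2 by norm_num,
      show n + 1 = n + 1 from rfl]
  have hsplit : PySem.List.pyRange 2 (n + 1) = PySem.List.pyRange 2 n ++ [n] :=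
    PySem.List.pyRange_one_succ_right (by omega)
  rw [hsplit]
  have hmod1 : PySem.Int.mod (0 + 1) n = 1 := by
    rw [PySem.Int.mod_eq_emod_of_pos (by omega : (0:Int) < n)]
    norm_num
    exact Int.emod_eq_of_lt (by omega) (by omega)
  simp only [pvAGo, hmod1]
  have hget : PySem.List.pyGetD (List.replicate n.toNat false) (1:Int) false = false := by
    rw [PySem.List.pyGetD_eq_getElem _ _ (by omega)
        (by rw [List.length_replicate]; omega)]
    simp
  rw [hget]
  simp only [Bool.false_eq_true, if_false]
  exact pvAGo_last_no n _ _ 1 (by omega) (by omega) (by rw [List.length_replicate])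

-- halving both arguments preserves a zero bitwise AND
theorem pvHalfAnd (x y : Nat) (h : x &&& y = 0) : x / 2 &&& y / 2 = 0 := by
  apply Nat.eq_of_testBit_eq
  intro i
  rw [Nat.testBit_land, ← Nat.testBit_add_one x i, ← Nat.testBit_add_one y i,
      ← Nat.testBit_land, h]
  simp

-- the classic bit trick, forward direction: m & (m-1) = 0 forces m to be a power of two
theorem pvPow2_of_and_pred (m : Nat) : 0 < m → m &&& (m - 1) = 0 → ∃ k, m = 2 ^ k := by
  induction m using Nat.strong_induction_on with
  | _ m ih =>
    intro h1 h2
    by_cases hm1 : m = 1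
    · exact ⟨0, by simp [hm1]⟩
    · have h2' := pvHalfAnd _ _ h2
      rcases Nat.even_or_odd m with he | ho
      · obtain ⟨a, ha⟩ := he
        have hd : m / 2 = a := by omega
        have hd2 : (m - 1) / 2 = a - 1 := by omega
        rw [hd, hd2] at h2'
        obtain ⟨k, hk⟩ := ih a (by omega) (by omega) h2'
        exact ⟨k + 1, by rw [pow_succ]; omega⟩
      · obtain ⟨a, ha⟩ := ho
        have hd : m / 2 = a := by omega
        have hd2 : (m - 1) / 2 = a := by omega
        rw [hd, hd2, Nat.and_self] at h2'
        omega

-- B answers "NO" on every admitted n outside D_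
theorem pvB_no (n : Int) (hdom : Dom_will_fly_visit_all_cups n) (h2 : 2 ≤ n)
    (hnd : ¬ D_will_fly_visit_all_cups n) : will_fly_visit_all_cups_alt n = "NO" := by
  unfold will_fly_visit_all_cups_alt
  rw [if_neg]
  intro hband
  rw [PySem.Int.band_of_nonneg (by omega) (by omega)] at hband
  have hand : n.toNat &&& (n.toNat - 1) = 0 := by
    have h1 : (n - 1).toNat = n.toNat - 1 := by omega
    rw [← h1]
    exact_mod_cast hband
  obtain ⟨k, hk⟩ := pvPow2_of_and_pred n.toNat (by omega) hand
  have hub : n.toNat ≤ 2 ^ 31 := by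
    simp only [Dom_will_fly_visit_all_cups, pvDomInt, decide_eq_true_eq] at hdom
    omega
  have hk31 : k ≤ 31 := by
    by_contra hgt
    have : (2:Nat) ^ 32 ≤ 2 ^ k := Nat.pow_le_pow_right (by norm_num) (by omega)
    omega
  refine hnd ⟨h2, k, Finset.mem_range.mpr (by omega), ?_⟩
  have : n = (n.toNat : Int) := by omega
  rw [this, hk]
  push_cast
  ring

-- ===== VERDICT (by name: the statement is the Claim_ definition above) =====
theorem will_fly_visit_all_cups_spec : Claim_unchanged_will_fly_visit_all_cups := by
  intro n hdom hpre hnd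
  show will_fly_visit_all_cups n = will_fly_visit_all_cups_alt n
  have hpre' : 0 ≤ n := hpre
  by_cases h01 : n = 0 ∨ n = 1
  · rcases h01 with rfl | rfl <;> decide
  · have h2 : 2 ≤ n := by omega
    rw [pvA_no_of_two_le n h2, pvB_no n hdom h2 hnd]

theorem will_fly_visit_all_cups_changed : Claim_changed_will_fly_visit_all_cups := by
  unfold Claim_changed_will_fly_visit_all_cups; decide

theorem will_fly_visit_all_cups_tight : Claim_exact_will_fly_visit_all_cups := by
  intro n hdom hpre hd
  obtain ⟨h2, k, hk, rfl⟩ := hd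
  have hk32 : k < 32 := Finset.mem_range.mp hk
  rw [pvA_no_of_two_le _ h2]
  revert h2
  interval_cases k <;> decide
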